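-- pv_equiv track=rewrite | github.com/TheoreticalHybrid/AdventOfCode2021 | Day 6/main.py | getCountLookup
-- ===== SOURCE A (Python) =====
-- def getCountLookup(maxDays):
--     daysCompletedCatalog = {}
--
--     for daysLeft in range(maxDays):
--         children = int(daysLeft / 7)
--         if daysLeft % 7 > 0: children += 1
--
--         count = children
--
--         for i in range(1, children + 1):
--             nextIndex = daysLeft - (7 * i) - 2
--             count += daysCompletedCatalog[maxDays - nextIndex] if nextIndex > 0 else 0
--
--         daysCompletedCatalog[maxDays - daysLeft] = count
--
--     return daysCompletedCatalog
-- ===== SOURCE B (Python) =====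
-- def getCountLookup(maxDays):
--     # One-pass O(maxDays) table: count(d) = 1 + count(d-7) + count(d-9) for d >= 1 (missing terms 0), count(0) = 0.
--     counts = []
--     for d in range(maxDays):
--         if d == 0:
--             v = 0
--         else:
--             v = 1 + (counts[d - 7] if d >= 7 else 0) + (counts[d - 9] if d >= 9 else 0)
--         counts.append(v)
--     return {maxDays - d: v for d, v in enumerate(counts)}
-- ===== Notes on version B (the rewrite author's own statement) =====
-- stated objective: faster
-- what changed: Replaces the quadratic inner loop (summing previously catalogued descendant counts over all spawn generations) with the linear recurrence count(d) = 1 + count(d-7) + count(d-9), filling the table in one pass.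
import Mathlib
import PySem

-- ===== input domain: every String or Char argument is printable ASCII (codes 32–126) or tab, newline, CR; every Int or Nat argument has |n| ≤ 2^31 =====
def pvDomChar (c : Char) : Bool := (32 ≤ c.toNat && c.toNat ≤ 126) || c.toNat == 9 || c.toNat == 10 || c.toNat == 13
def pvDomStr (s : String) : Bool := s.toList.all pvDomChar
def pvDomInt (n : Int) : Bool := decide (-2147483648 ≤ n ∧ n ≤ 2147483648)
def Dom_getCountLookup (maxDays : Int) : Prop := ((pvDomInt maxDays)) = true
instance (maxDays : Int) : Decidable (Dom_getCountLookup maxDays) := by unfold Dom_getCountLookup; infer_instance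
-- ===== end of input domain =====

-- B replaces A's quadratic catalog-summing inner loop by the linear recurrence
-- count(d) = 1 + count(d-7) + count(d-9), one pass over the days.

-- ===== PORT A =====
-- int(daysLeft/7) is ported as floor division: daysLeft ≥ 0 here, so float truncation is exact on the domain.
-- daysCompletedCatalog[maxDays - nextIndex] is ported with getD 0: the key is always present (nextIndex ranges over
-- strictly earlier days already inserted), so Python never raises KeyError and the default is never used.
def getCountLookup (maxDays : Int) : List (Int × Int) :=
  ((PySem.List.pyRange 0 maxDays 1).foldl (fun cat daysLeft =>
      let children0 := PySem.Int.floordiv daysLeft 7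
      let children := if PySem.Int.mod daysLeft 7 > 0 then children0 + 1 else children0
      let count := (PySem.List.pyRange 1 (children + 1) 1).foldl (fun count i =>
        let nextIndex := daysLeft - 7 * i - 2
        count + (if nextIndex > 0 then cat.getD (maxDays - nextIndex) 0 else 0)) children
      cat.insert (maxDays - daysLeft) count)
    (PySem.Dict.empty : PySem.Dict Int Int)).items

-- ===== PORT B =====
def getCountLookup_alt (maxDays : Int) : List (Int × Int) :=
  let counts := (PySem.List.pyRange 0 maxDays 1).foldl (fun counts d =>
      let v : Int := if d = 0 then 0 else
        1 + (if d ≥ 7 then PySem.List.pyGetD counts (d - 7) 0 else 0)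
          + (if d ≥ 9 then PySem.List.pyGetD counts (d - 9) 0 else 0)
      counts ++ [v]) ([] : List Int)
  (PySem.List.enumerate counts 0).map (fun p => (maxDays - p.1, p.2))

-- ===== PRECONDITION & SPEC =====
def Spec_getCountLookup (maxDays : Int) (out : List (Int × Int)) : Prop := out = getCountLookup_alt maxDays
instance (maxDays : Int) (out : List (Int × Int)) : Decidable (Spec_getCountLookup maxDays out) := by unfold Spec_getCountLookup; infer_instance

-- ===== CLAIM (what is proved, stated in full; the proofs are below) =====
def Claim_equal_getCountLookup : Prop := ∀ (maxDays : Int), Dom_getCountLookup maxDays → Spec_getCountLookup maxDays (getCountLookup maxDays)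

-- ===== LEMMAS AND PROOFS =====

-- The common mathematical value: descendant count for a fish with d days left.
def cB (d : Nat) : Int :=
  if _h0 : d = 0 then 0
  else 1 + (if _h7 : 7 ≤ d then cB (d - 7) else 0) + (if _h9 : 9 ≤ d then cB (d - 9) else 0)
decreasing_by all_goals omega

-- number of direct children A computes for day d
def chA (d : Nat) : Nat := d / 7 + (if d % 7 > 0 then 1 else 0)

-- one summand of A's inner loop, with the catalog already replaced by cB
def gA (d i : Nat) : Int := if 7 * i + 2 < d then cB (d - (7 * i + 2)) else 0

-- A's per-day value, mathematically
def aExpr (d : Nat) : Int := (chA d : Int) + ((List.range (chA d)).map (fun j => gA d (j + 1))).sum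

lemma chA_succ7 (d : Nat) (h : 7 ≤ d) : chA d = chA (d - 7) + 1 := by
  unfold chA
  split_ifs <;> omega

lemma gA_shift (d j : Nat) (h : 7 ≤ d) : gA d (j + 2) = gA (d - 7) (j + 1) := by
  unfold gA
  have h1 : 7 * (j + 2) + 2 < d ↔ 7 * (j + 1) + 2 < d - 7 := by omega
  have h2 : d - (7 * (j + 2) + 2) = d - 7 - (7 * (j + 1) + 2) := by omega
  simp only [h2]
  by_cases hc : 7 * (j + 2) + 2 < d
  · rw [if_pos hc, if_pos (h1.mp hc)]
  · rw [if_neg hc, if_neg (fun hx => hc (h1.mpr hx))]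

lemma aExpr_eq_cB (d : Nat) : aExpr d = cB d := by
  induction d using Nat.strong_induction_on with
  | _ d ih =>
    by_cases h0 : d = 0
    · subst h0; simp [aExpr, chA, cB]
    by_cases h7 : 7 ≤ d
    · have hch := chA_succ7 d h7
      have ihd : aExpr (d - 7) = cB (d - 7) := ih (d - 7) (by omega)
      have hsum : ((List.range (chA d)).map (fun j => gA d (j + 1))).sum
          = gA d 1 + ((List.range (chA (d - 7))).map (fun j => gA (d - 7) (j + 1))).sum := by
        rw [hch, List.range_succ_eq_map]
        simp only [List.map_cons, List.map_map, List.sum_cons]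
        congr 1
        congr 1
        apply List.map_congr_left
        intro j _
        simp only [Function.comp_apply, Nat.succ_eq_add_one]
        exact gA_shift d j h7
      have hg1 : gA d 1 = (if 9 ≤ d then cB (d - 9) else 0) := by
        unfold gA
        by_cases h9 : 9 ≤ d
        · by_cases h9' : 9 < d
          · rw [if_pos (by omega), if_pos h9]
          · have : d = 9 := by omega
            subst this
            simp [cB]
        · rw [if_neg (by omega), if_neg h9]
      have hA : aExpr d = 1 + gA d 1 + aExpr (d - 7) := by
        unfold aExpr
        rw [hsum, hch]
        push_cast [Nat.cast_add]
        ring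
      rw [hA, ihd, hg1]
      conv_rhs => rw [cB]
      rw [dif_neg h0, dif_pos h7]
      by_cases h9 : 9 ≤ d
      · rw [if_pos h9, dif_pos h9]; ring
      · rw [if_neg h9, dif_neg h9]; ring
    · -- 1 ≤ d ≤ 6
      have hch : chA d = 1 := by unfold chA; split_ifs <;> omega
      have : aExpr d = 1 := by
        unfold aExpr
        rw [hch]
        simp [List.range_succ, gA, show ¬ (7 * 1 + 2 < d) by omega]
      rw [this, cB, dif_neg h0, dif_neg h7, dif_neg (by omega : ¬ 9 ≤ d)]
      ring

-- the catalog after processing days 0..k-1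
def catList (maxDays : Int) (k : Nat) : List (Int × Int) :=
  (List.range k).map (fun (d : Nat) => (maxDays - (d : Int), cB d))

lemma keys_catList_nodup (maxDays : Int) (k : Nat) :
    ((catList maxDays k).map (·.1)).Nodup := by
  unfold catList
  rw [List.map_map]
  refine List.Nodup.map ?_ (List.nodup_range)
  intro a b hab
  simp only [Function.comp_apply] at hab
  omega

lemma getD_catList (maxDays : Int) (k : Nat) (n : Nat) (hn : n < k) :
    (PySem.Dict.mk (catList maxDays k)).getD (maxDays - (n : Int)) 0 = cB n := by
  apply PySem.Dict.getD_of_mem_items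
  · show (maxDays - (n : Int), cB n) ∈ (PySem.Dict.mk (catList maxDays k)).items
    unfold catList
    exact List.mem_map.mpr ⟨n, List.mem_range.mpr hn, rfl⟩
  · show ((PySem.Dict.mk (catList maxDays k)).keys).Nodup
    simp only [PySem.Dict.keys]
    exact keys_catList_nodup maxDays k

lemma not_contains_catList (maxDays : Int) (k : Nat) :
    (PySem.Dict.mk (catList maxDays k)).contains (maxDays - (k : Int)) = false := by
  rw [PySem.Dict.contains_mk]
  unfold catList
  simp only [List.any_eq_false]
  intro p hp
  obtain ⟨d, hd, rfl⟩ := List.mem_map.mp hp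
  have : d < k := List.mem_range.mp hd
  simp
  omega

-- A's per-day body, given the catalog for the first k days, computes cB k.
lemma body_eq (maxDays : Int) (k : Nat) :
    (PySem.List.pyRange 1 ((if PySem.Int.mod (k : Int) 7 > 0 then PySem.Int.floordiv (k : Int) 7 + 1 else PySem.Int.floordiv (k : Int) 7) + 1) 1).foldl
      (fun count i =>
        count + (if (k : Int) - 7 * i - 2 > 0 then (PySem.Dict.mk (catList maxDays k)).getD (maxDays - ((k : Int) - 7 * i - 2)) 0 else 0))
      (if PySem.Int.mod (k : Int) 7 > 0 then PySem.Int.floordiv (k : Int) 7 + 1 else PySem.Int.floordiv (k : Int) 7)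
    = cB k := by
  have hch : (if PySem.Int.mod (k : Int) 7 > 0 then PySem.Int.floordiv (k : Int) 7 + 1 else PySem.Int.floordiv (k : Int) 7)
      = (chA k : Int) := by
    have hfd : PySem.Int.floordiv (k : Int) 7 = (k : Int) / 7 :=
      PySem.Int.floordiv_eq_ediv_of_pos (by norm_num)
    have hmd : PySem.Int.mod (k : Int) 7 = (k : Int) % 7 :=
      PySem.Int.mod_eq_emod_of_pos (by norm_num)
    rw [hfd, hmd]
    unfold chA
    by_cases h : (k : Int) % 7 > 0
    · rw [if_pos h, if_pos (show k % 7 > 0 by omega)]; push_cast; omega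
    · rw [if_neg h, if_neg (show ¬ k % 7 > 0 by omega)]; push_cast; omega
  simp only [hch]
  rw [PySem.List.foldl_add]
  rw [← aExpr_eq_cB]
  unfold aExpr
  congr 1
  have hr : PySem.List.pyRange 1 ((chA k : Int) + 1) 1
      = (List.range (chA k)).map (fun (j : Nat) => (1 : Int) + (j : Int)) := by
    rw [PySem.List.pyRange_one]
    have h1 : ((chA k : Int) + 1 - 1).toNat = chA k := by omega
    rw [h1]
  rw [hr, List.map_map]
  congr 1
  apply List.map_congr_left
  intro j hj
  have hjk : j < chA k := List.mem_range.mp hj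
  simp only [Function.comp_apply]
  unfold gA
  by_cases hpos : ((k : Int) - 7 * ((1 : Int) + (j : Int)) - 2) > 0
  · have hlt : 7 * (j + 1) + 2 < k := by omega
    rw [if_pos hpos, if_pos hlt]
    have hkey : maxDays - ((k : Int) - 7 * ((1 : Int) + (j : Int)) - 2)
        = maxDays - ((k - (7 * (j + 1) + 2) : Nat) : Int) := by
      push_cast; omega
    rw [hkey, getD_catList maxDays k _ (by omega)]
  · rw [if_neg hpos, if_neg (by omega)]

-- A's fold builds catList.
lemma afold_eq (maxDays : Int) (n : Nat) :
    ((List.range n).map (fun (d : Nat) => (d : Int))).foldl (fun cat daysLeft =>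
      let children0 := PySem.Int.floordiv daysLeft 7
      let children := if PySem.Int.mod daysLeft 7 > 0 then children0 + 1 else children0
      let count := (PySem.List.pyRange 1 (children + 1) 1).foldl (fun count i =>
        let nextIndex := daysLeft - 7 * i - 2
        count + (if nextIndex > 0 then cat.getD (maxDays - nextIndex) 0 else 0)) children
      cat.insert (maxDays - daysLeft) count)
      (PySem.Dict.empty : PySem.Dict Int Int)
    = PySem.Dict.mk (catList maxDays n) := by
  induction n with
  | zero =>
    simp [catList, PySem.Dict.empty]
  | succ n ih =>
    rw [List.range_succ, List.map_append, List.foldl_append, ih]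
    simp only [List.map_cons, List.map_nil, List.foldl_cons, List.foldl_nil]
    apply PySem.Dict.ext
    rw [PySem.Dict.items_insert, not_contains_catList maxDays n]
    simp only [Bool.false_eq_true, if_false]
    rw [body_eq maxDays n]
    show catList maxDays n ++ [(maxDays - (n : Int), cB n)] = catList maxDays (n + 1)
    unfold catList
    rw [List.range_succ, List.map_append]
    rfl

-- B's fold builds the cB table.
lemma bfold_eq (n : Nat) :
    ((List.range n).map (fun (d : Nat) => (d : Int))).foldl (fun counts d =>
      let v : Int := if d = 0 then 0 else
        1 + (if d ≥ 7 then PySem.List.pyGetD counts (d - 7) 0 else 0)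
          + (if d ≥ 9 then PySem.List.pyGetD counts (d - 9) 0 else 0)
      counts ++ [v]) ([] : List Int)
    = (List.range n).map cB := by
  induction n with
  | zero => simp
  | succ n ih =>
    rw [List.range_succ, List.map_append, List.foldl_append, ih]
    simp only [List.map_cons, List.map_nil, List.foldl_cons, List.foldl_nil]
    rw [List.map_append]
    congr 1
    simp only [List.map_cons, List.map_nil]
    congr 1
    by_cases h0 : (n : Int) = 0
    · have : n = 0 := by omega
      subst this
      simp [cB]
    by_cases h9 : (n : Int) ≥ 9
    · have e7 : (n : Int) - 7 = ((n - 7 : Nat) : Int) := by omega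
      have e9 : (n : Int) - 9 = ((n - 9 : Nat) : Int) := by omega
      rw [if_neg h0, if_pos (by omega), if_pos h9, e7, e9,
        PySem.List.pyGetD_natCast, PySem.List.pyGetD_natCast,
        List.getD_eq_getElem?_getD, List.getD_eq_getElem?_getD]
      rw [List.getElem?_map, List.getElem?_range (by omega : n - 7 < n),
        List.getElem?_map, List.getElem?_range (by omega : n - 9 < n)]
      rw [cB, dif_neg (by omega), dif_pos (by omega), dif_pos (by omega)]
      simp
    by_cases h7 : (n : Int) ≥ 7
    · have e7 : (n : Int) - 7 = ((n - 7 : Nat) : Int) := by omega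
      rw [if_neg h0, if_pos h7, if_neg h9, e7, PySem.List.pyGetD_natCast,
        List.getD_eq_getElem?_getD]
      rw [List.getElem?_map, List.getElem?_range (by omega : n - 7 < n)]
      rw [cB, dif_neg (by omega), dif_pos (by omega), dif_neg (by omega)]
      simp
    · rw [if_neg h0, if_neg h7, if_neg h9]
      rw [cB, dif_neg (by omega), dif_neg (by omega), dif_neg (by omega)]

lemma enum_map (maxDays : Int) (n : Nat) :
    (PySem.List.enumerate ((List.range n).map cB) 0).map (fun p => (maxDays - p.1, p.2))
    = catList maxDays n := by
  induction n with
  | zero => simp [catList, PySem.List.enumerate_nil]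
  | succ n ih =>
    rw [List.range_succ, List.map_append]
    rw [PySem.List.enumerate_append, List.map_append, ih]
    unfold catList
    rw [List.range_succ, List.map_append]
    congr 1
    simp [PySem.List.enumerate_cons, PySem.List.enumerate_nil]

-- ===== VERDICT (by name: the statement is the Claim_ definition above) =====
theorem getCountLookup_spec : Claim_equal_getCountLookup := by
  intro maxDays _
  show getCountLookup maxDays = getCountLookup_alt maxDays
  unfold getCountLookup getCountLookup_alt
  rw [PySem.List.pyRange_zero]
  rw [afold_eq maxDays maxDays.toNat, bfold_eq maxDays.toNat,
    enum_map maxDays maxDays.toNat]
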